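-- pv_equiv track=rewrite | github.com/CarlosUriass/compilador | automatas/cadenas.py | validar_cadena
-- ===== SOURCE A (Python) =====
-- def validar_cadena(cadena: str) -> bool:
--     """
--     Valida si un texto es una cadena válida.
--
--     Reglas:
--     - Debe iniciar y terminar con comillas dobles (").
--     - Puede contener una secuencia de letras, dígitos y ciertos caracteres especiales
--       como: (, ), ;, _, ,, ., :
--
--     Retorna True si es válido, False en caso contrario.
--     """
--     if not cadena or len(cadena) < 2:
--         return False
--
--     if cadena[0] != '"' or cadena[-1] != '"':
--         return False
--
--     caracteres_especiales = {'(', ')', ';', '_', ',', '.', ':'}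
--
--     for char in cadena[1:-1]:
--         es_letra = ('a' <= char <= 'z') or ('A' <= char <= 'Z')
--         es_digito = ('0' <= char <= '9')
--         es_especial = char in caracteres_especiales
--
--         if not (es_letra or es_digito or es_especial):
--             return False
--
--     return True
-- ===== SOURCE B (Python) =====
-- import re
--
-- _CADENA_RE = re.compile(r'"[A-Za-z0-9();_,.:]*"')
--
-- def validar_cadena(cadena: str) -> bool:
--     """Single anchored regex instead of manual delimiter checks and a per-char loop."""
--     return bool(_CADENA_RE.fullmatch(cadena))
-- ===== Notes on version B (the rewrite author's own statement) =====
-- stated objective: idiomatic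
-- what changed: Replaced the manual length/delimiter checks plus per-character classification loop with one anchored regular-expression fullmatch over the whole string.
import Mathlib
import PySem

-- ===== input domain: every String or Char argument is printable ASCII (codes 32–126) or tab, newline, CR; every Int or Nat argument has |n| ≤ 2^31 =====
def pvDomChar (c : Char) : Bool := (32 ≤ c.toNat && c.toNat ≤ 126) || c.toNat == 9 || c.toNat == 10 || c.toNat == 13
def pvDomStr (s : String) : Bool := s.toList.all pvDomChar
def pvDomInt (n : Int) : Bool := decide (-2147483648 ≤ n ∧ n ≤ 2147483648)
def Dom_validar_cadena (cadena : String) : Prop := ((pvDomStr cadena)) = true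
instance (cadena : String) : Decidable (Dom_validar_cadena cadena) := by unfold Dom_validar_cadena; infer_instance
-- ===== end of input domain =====

-- B replaces A's manual delimiter checks + per-character loop by one anchored
-- regex fullmatch of "[A-Za-z0-9();_,.:]*" over the whole string (idiomatic rewrite).

-- ===== PORT A =====
-- caracteres_especiales = {'(', ')', ';', '_', ',', '.', ':'}
def caracteresEspeciales : PySem.Set Char :=
  PySem.Set.ofList ['(', ')', ';', '_', ',', '.', ':']

-- the 'for char in cadena[1:-1]' loop with its early 'return False'
def loopA : List Char → Bool
  | [] => true
  | char :: rest =>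
    let es_letra := ('a' ≤ char && char ≤ 'z') || ('A' ≤ char && char ≤ 'Z')
    let es_digito := ('0' ≤ char && char ≤ '9')
    let es_especial := caracteresEspeciales.contains char
    if !(es_letra || es_digito || es_especial) then false else loopA rest

def validar_cadena (cadena : String) : Bool :=
  if cadena.toList.isEmpty || cadena.toList.length < 2 then false
  else if PySem.List.pyGet? cadena.toList 0 ≠ some '"' ||
      PySem.List.pyGet? cadena.toList (-1) ≠ some '"' then false
  else loopA (PySem.List.slice cadena.toList (some 1) (some (-1)))

-- ===== PORT B =====
-- the regex character class [A-Za-z0-9();_,.:]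
def classB (c : Char) : Bool :=
  ('A' ≤ c && c ≤ 'Z') || ('a' ≤ c && c ≤ 'z') || ('0' ≤ c && c ≤ '9') ||
    ['(', ')', ';', '_', ',', '.', ':'].contains c

-- matcher for the regex tail [A-Za-z0-9();_,.:]*" after the leading quote was consumed
def tailMatch : List Char → Bool
  | [] => false
  | [c] => c == '"'
  | c :: rest => classB c && tailMatch rest

-- fullmatch of "[A-Za-z0-9();_,.:]*" : consume the leading quote, then match the tail
def validar_cadena_alt (cadena : String) : Bool :=
  match cadena.toList with
  | '"' :: rest => tailMatch rest
  | _ => false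

-- ===== PRECONDITION & SPEC =====
def Spec_validar_cadena (cadena : String) (out : Bool) : Prop := out = validar_cadena_alt cadena
instance (cadena : String) (out : Bool) : Decidable (Spec_validar_cadena cadena out) := by unfold Spec_validar_cadena; infer_instance

-- ===== CLAIM (what is proved, stated in full; the proofs are below) =====
def Claim_equal_validar_cadena : Prop := ∀ (cadena : String), Dom_validar_cadena cadena → Spec_validar_cadena cadena (validar_cadena cadena)

-- ===== LEMMAS AND PROOFS =====

-- B's character class agrees with A's letter/digit/special test
theorem classB_eq (c : Char) :
    classB c = ((('a' ≤ c && c ≤ 'z') || ('A' ≤ c && c ≤ 'Z')) || ('0' ≤ c && c ≤ '9') ||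
      caracteresEspeciales.contains c) := by
  rw [Bool.eq_iff_iff]
  simp [classB, caracteresEspeciales, PySem.Set.ofList]
  tauto

-- A's loop step is a conjunction with B's character class
theorem loopA_cons (c : Char) (m : List Char) :
    loopA (c :: m) = (classB c && loopA m) := by
  rw [classB_eq]
  show (if !((('a' ≤ c && c ≤ 'z') || ('A' ≤ c && c ≤ 'Z')) || ('0' ≤ c && c ≤ '9') ||
      caracteresEspeciales.contains c) then false else loopA m) = _
  cases h : ((('a' ≤ c && c ≤ 'z') || ('A' ≤ c && c ≤ 'Z')) || ('0' ≤ c && c ≤ '9') ||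
      caracteresEspeciales.contains c) <;> simp_all

-- B's tail matcher = "last char is a quote and the chars before it pass A's loop"
theorem tailMatch_eq (m : List Char) :
    m ≠ [] → tailMatch m = ((m.getLast? == some '"') && loopA m.dropLast) := by
  induction m with
  | nil => intro h; simp at h
  | cons c rest ih =>
    intro _
    cases rest with
    | nil => simp [tailMatch, loopA]
    | cons d rest' =>
      rw [show tailMatch (c :: d :: rest') = (classB c && tailMatch (d :: rest')) from rfl,
        ih (by simp), List.getLast?_cons_cons,
        show (c :: d :: rest').dropLast = c :: (d :: rest').dropLast from rfl, loopA_cons]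
      cases classB c <;> simp

-- xs[1:-1] is tail-then-dropLast
theorem slice_one_neg_one (xs : List Char) :
    PySem.List.slice xs (some 1) (some (-1)) = xs.tail.dropLast := by
  simp only [PySem.List.slice, Int.reduceNeg, Order.lt_one_iff, PySem.List.clampIdx_neg_ofNat,
    zero_le_one, PySem.List.clampIdx_of_nonneg, Int.toNat_one]
  cases xs with
  | nil => simp
  | cons x xs =>
    simp [List.dropLast_eq_take]

-- ===== VERDICT (by name: the statement is the Claim_ definition above) =====
theorem validar_cadena_spec : Claim_equal_validar_cadena := by
  intro cadena _
  unfold Spec_validar_cadena validar_cadena validar_cadena_alt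
  cases hl : cadena.toList with
  | nil => simp
  | cons c m =>
    cases m with
    | nil =>
      by_cases hc : c = '"'
      · subst hc; simp [tailMatch]
      · split <;> simp_all
    | cons d rest =>
      rw [slice_one_neg_one]
      simp only [List.isEmpty_cons, List.length_cons,
        PySem.List.pyGet?_zero_cons, PySem.List.pyGet?_neg_one]
      by_cases hc : c = '"'
      · subst hc
        show _ = tailMatch (d :: rest)
        rw [tailMatch_eq (d :: rest) (by simp)]
        by_cases hg : ('"' :: d :: rest).getLast? = some '"' <;>
          simp_all [List.getLast?_cons_cons]
      · split <;> simp_all
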